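-- pv_equiv track=rewrite | github.com/maxspannring/Heuristic-Optimizaton-Techniques | exercise1.py | evaluate_partial
-- ===== SOURCE A (Python) =====
-- def evaluate_partial(x, Q):
--     """Evaluate partial assignment x."""
--     xv = [(0 if b is None else b) for b in x]
--
--     val = 0
--     n = len(x)
--     for i in range(n):
--         for j in range(n):
--             val += xv[i] * Q[i][j] * xv[j]
--     return val
-- ===== SOURCE B (Python) =====
-- def evaluate_partial(x, Q):
--     """Evaluate partial assignment x: x^T Q x with None treated as 0,
--     summing only over the sparse support of x (indices whose value is
--     neither None nor 0) -- zero entries contribute nothing."""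
--     support = [(i, b) for i, b in enumerate(x) if b is not None and b != 0]
--     return sum(vi * Q[i][j] * vj for i, vi in support for j, vj in support)
-- ===== Notes on version B (the rewrite author's own statement) =====
-- stated objective: alternative
-- what changed: Instead of A's dense n-by-n double loop over all index pairs, B first extracts the sparse support of x (the (index,value) pairs that are neither None nor 0) and sums vi*Q[i][j]*vj only over pairs of support entries, skipping every zero term.
import Mathlib
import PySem

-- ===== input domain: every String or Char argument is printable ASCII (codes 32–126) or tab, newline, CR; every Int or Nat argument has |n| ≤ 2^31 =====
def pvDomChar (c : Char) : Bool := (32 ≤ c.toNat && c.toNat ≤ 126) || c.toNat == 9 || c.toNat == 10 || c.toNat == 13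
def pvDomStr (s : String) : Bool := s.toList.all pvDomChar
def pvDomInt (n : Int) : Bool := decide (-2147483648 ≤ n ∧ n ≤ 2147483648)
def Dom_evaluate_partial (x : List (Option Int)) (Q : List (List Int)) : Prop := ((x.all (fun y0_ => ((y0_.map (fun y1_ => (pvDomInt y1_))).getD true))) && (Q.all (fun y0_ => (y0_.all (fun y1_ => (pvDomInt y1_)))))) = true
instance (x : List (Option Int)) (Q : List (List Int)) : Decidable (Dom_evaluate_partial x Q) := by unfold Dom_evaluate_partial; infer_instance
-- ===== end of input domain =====

-- B computes x^T Q x by summing vi*Q[i][j]*vj only over pairs from the sparse support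
-- of x (entries neither None nor 0) instead of A's dense double loop; alternative algorithm.

-- ===== PORT A =====
def evaluate_partial (x : List (Option Int)) (Q : List (List Int)) : Int :=
  let xv := x.map (fun b => b.getD 0)
  let n : Int := x.length
  (PySem.List.pyRange 0 n 1).foldl (fun val i =>
    (PySem.List.pyRange 0 n 1).foldl (fun val j =>
      val + PySem.List.pyGetD xv i 0 * PySem.List.pyGetD (PySem.List.pyGetD Q i []) j 0 * PySem.List.pyGetD xv j 0) val) 0

-- ===== PORT B =====
def evaluate_partial_alt (x : List (Option Int)) (Q : List (List Int)) : Int :=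
  let support := (PySem.List.enumerate x).filterMap (fun p =>
    match p.2 with
    | none => none
    | some v => if v = 0 then none else some (p.1, v))
  (support.map (fun p =>
    (support.map (fun q =>
      p.2 * PySem.List.pyGetD (PySem.List.pyGetD Q p.1 []) q.1 0 * q.2)).sum)).sum

-- ===== PRECONDITION & SPEC =====
-- Pre_ excludes exactly the inputs where the Python A raises IndexError: Q must have
-- at least len(x) rows and each of those first len(x) rows at least len(x) entries.
def Pre_evaluate_partial (x : List (Option Int)) (Q : List (List Int)) : Prop :=
  x.length ≤ Q.length ∧ ∀ row ∈ Q.take x.length, x.length ≤ row.length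
instance (x : List (Option Int)) (Q : List (List Int)) : Decidable (Pre_evaluate_partial x Q) := by
  unfold Pre_evaluate_partial; infer_instance
def pvWitness_evaluate_partial : List (Option Int) × List (List Int) :=
  ([some 1, none], [[1, 2], [3, 4]])
def Spec_evaluate_partial (x : List (Option Int)) (Q : List (List Int)) (out : Int) : Prop := out = evaluate_partial_alt x Q
instance (x : List (Option Int)) (Q : List (List Int)) (out : Int) : Decidable (Spec_evaluate_partial x Q out) := by unfold Spec_evaluate_partial; infer_instance

-- ===== CLAIM (what is proved, stated in full; the proofs are below) =====
def Claim_equal_evaluate_partial : Prop := ∀ (x : List (Option Int)) (Q : List (List Int)), Dom_evaluate_partial x Q → Pre_evaluate_partial x Q → Spec_evaluate_partial x Q (evaluate_partial x Q)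

-- ===== LEMMAS AND PROOFS =====

-- A nested pair of add-accumulating foldls is the sum of per-row sums.
theorem pv_foldl_foldl_add (l1 l2 : List Int) (f : Int → Int → Int) (a : Int) :
    l1.foldl (fun v i => l2.foldl (fun v j => v + f i j) v) a =
      a + (l1.map (fun i => (l2.map (f i)).sum)).sum := by
  induction l1 generalizing a with
  | nil => simp
  | cons b t ih =>
      simp only [List.foldl_cons, PySem.List.foldl_add, List.map_cons, List.sum_cons]
      ring

-- Summing F over the sparse support of x equals summing F over all indices of R,
-- provided F vanishes on value 0 (None and 0 entries contribute nothing).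
theorem pv_sparse_sum (x : List (Option Int)) (R : List Int) (F : Int → Int → Int)
    (hF : ∀ j, F j 0 = 0) :
    ((R.filterMap (fun j =>
        match PySem.List.pyGetD x j none with
        | none => none
        | some v => if v = 0 then none else some (j, v))).map
      (fun p => F p.1 p.2)).sum
    = (R.map (fun j => F j ((PySem.List.pyGetD x j none).getD 0))).sum := by
  induction R with
  | nil => simp
  | cons j R' ih =>
      cases h : PySem.List.pyGetD x j none with
      | none => simp [h, hF, ih]
      | some v =>
          by_cases hv : v = 0
          · simp [h, hv, hF, ih]
          · simp [h, hv, ih]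

-- ===== VERDICT (by name: the statement is the Claim_ definition above) =====
theorem evaluate_partial_spec : Claim_equal_evaluate_partial := by
  intro x Q _ _
  unfold Spec_evaluate_partial evaluate_partial evaluate_partial_alt
  simp only [PySem.List.enumerate_eq_map_pyRange x none, PySem.List.len_eq,
    List.filterMap_map, Function.comp_def]
  rw [pv_foldl_foldl_add]
  rw [pv_sparse_sum x _ (fun i v =>
        ((PySem.List.pyRange 0 (x.length : Int) 1).filterMap (fun j =>
            match PySem.List.pyGetD x j none with
            | none => none
            | some w => if w = 0 then none else some (j, w))).map (fun q =>
              v * PySem.List.pyGetD (PySem.List.pyGetD Q i []) q.1 0 * q.2) |>.sum)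
      (by intro j; simp)]
  rw [zero_add]
  refine congrArg List.sum (List.map_congr_left ?_)
  intro i _
  rw [pv_sparse_sum x _ (fun j v =>
        ((PySem.List.pyGetD x i none).getD 0) * PySem.List.pyGetD (PySem.List.pyGetD Q i []) j 0 * v)
      (by intro j; ring)]
  refine congrArg List.sum (List.map_congr_left ?_)
  intro j _
  have hx : ∀ k : Int, PySem.List.pyGetD (x.map (fun b => b.getD 0)) k 0
      = (PySem.List.pyGetD x k none).getD 0 := by
    intro k
    simpa using PySem.List.pyGetD_map (fun b : Option Int => b.getD 0) x k none
  rw [hx i, hx j]
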